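-- pv_equiv track=rewrite | github.com/PrettyWood/future-typing | future_typing/utils.py | _is_new_union
-- ===== SOURCE A (Python) =====
-- from tokenize import NAME, NUMBER, OP, STRING, generate_tokens
-- from typing import List, Sequence, Tuple
--
-- Token = Tuple[int, str]
--
-- def _is_new_union(tokens: Sequence[Token]) -> bool:
--     has_union = False
--
--     for tp, val in tokens:
--         if tp not in (NAME, NUMBER, OP, STRING):
--             return False
--         if tp == OP and val == "|":
--             has_union = True
--
--     return has_union
-- ===== SOURCE B (Python) =====
-- # token-type constants as in Python's tokenize module
-- NAME, NUMBER, STRING, OP = 1, 2, 3, 54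
--
-- def _is_new_union(tokens):
--     if not all(tp in {NAME, NUMBER, OP, STRING} for tp, val in tokens):
--         return False
--     return any(tp == OP and val == "|" for tp, val in tokens)
-- ===== Notes on version B (the rewrite author's own statement) =====
-- stated objective: simpler
-- what changed: Replaces the single accumulating loop with early return by two independent declarative passes: an all() validating token types, then an any() detecting the '|' OP token, with no mutable flag.
import Mathlib
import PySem

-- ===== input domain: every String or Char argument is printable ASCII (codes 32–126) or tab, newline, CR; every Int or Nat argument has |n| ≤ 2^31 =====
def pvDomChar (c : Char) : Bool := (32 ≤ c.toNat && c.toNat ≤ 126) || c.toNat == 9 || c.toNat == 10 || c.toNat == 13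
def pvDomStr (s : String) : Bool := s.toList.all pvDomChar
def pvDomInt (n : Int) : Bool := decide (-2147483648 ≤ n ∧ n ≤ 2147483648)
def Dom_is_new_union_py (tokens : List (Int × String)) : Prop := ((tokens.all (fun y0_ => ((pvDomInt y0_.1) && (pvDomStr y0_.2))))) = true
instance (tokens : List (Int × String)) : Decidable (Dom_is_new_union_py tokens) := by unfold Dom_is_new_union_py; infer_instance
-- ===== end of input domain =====

-- B replaces A's single accumulating loop (with early return and a mutable flag)
-- by two declarative passes: validate all token types, then detect the '|' OP. Objective: simpler.

-- ===== PORT A =====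
-- token-type constants from Python's tokenize module: NAME=1, NUMBER=2, OP=54, STRING=3
-- the loop with early `return False` and the has_union accumulator, as structural recursion
def is_new_union_py_go (tokens : List (Int × String)) (has_union : Bool) : Bool :=
  match tokens with
  | [] => has_union
  | (tp, val) :: rest =>
    if ¬ (tp = 1 ∨ tp = 2 ∨ tp = 54 ∨ tp = 3) then false
    else is_new_union_py_go rest (has_union || (tp = 54 && val = "|"))

def is_new_union_py (tokens : List (Int × String)) : Bool :=
  is_new_union_py_go tokens false

-- ===== PORT B =====
def is_new_union_py_alt (tokens : List (Int × String)) : Bool :=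
  if ¬ (tokens.all (fun t => t.1 = 1 || t.1 = 2 || t.1 = 54 || t.1 = 3)) then false
  else tokens.any (fun t => t.1 = 54 && t.2 = "|")

-- ===== PRECONDITION & SPEC =====
def Spec_is_new_union_py (tokens : List (Int × String)) (out : Bool) : Prop := out = is_new_union_py_alt tokens
instance (tokens : List (Int × String)) (out : Bool) : Decidable (Spec_is_new_union_py tokens out) := by unfold Spec_is_new_union_py; infer_instance

-- ===== CLAIM (what is proved, stated in full; the proofs are below) =====
def Claim_equal_is_new_union_py : Prop := ∀ (tokens : List (Int × String)), Dom_is_new_union_py tokens → Spec_is_new_union_py tokens (is_new_union_py tokens)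

-- ===== LEMMAS AND PROOFS =====
theorem is_new_union_py_go_eq (tokens : List (Int × String)) (h : Bool) :
    is_new_union_py_go tokens h =
      (tokens.all (fun t => t.1 = 1 || t.1 = 2 || t.1 = 54 || t.1 = 3)
        && (h || tokens.any (fun t => t.1 = 54 && t.2 = "|"))) := by
  induction tokens generalizing h with
  | nil => simp [is_new_union_py_go]
  | cons x rest ih =>
    obtain ⟨tp, val⟩ := x
    simp only [is_new_union_py_go, List.all_cons, List.any_cons, ih]
    by_cases h1 : tp = 1 ∨ tp = 2 ∨ tp = 54 ∨ tp = 3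
    · simp only [if_neg (not_not_intro h1)]
      have : (decide (tp = 1) || decide (tp = 2) || decide (tp = 54) || decide (tp = 3)) = true := by
        rcases h1 with h | h | h | h <;> simp [h]
      simp only [this, Bool.true_and]
      cases h <;>
        simp [Bool.or_assoc, Bool.or_comm, Bool.or_left_comm]
    · have : (decide (tp = 1) || decide (tp = 2) || decide (tp = 54) || decide (tp = 3)) = false := by
        simp only [not_or] at h1; simp [h1.1, h1.2.1, h1.2.2.1, h1.2.2.2]
      rw [if_pos h1, this]; simp

-- ===== VERDICT (by name: the statement is the Claim_ definition above) =====
theorem is_new_union_py_spec : Claim_equal_is_new_union_py := by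
  intro tokens _
  unfold Spec_is_new_union_py is_new_union_py is_new_union_py_alt
  rw [is_new_union_py_go_eq]
  by_cases hall : tokens.all (fun t => t.1 = 1 || t.1 = 2 || t.1 = 54 || t.1 = 3) = true <;>
    simp [hall]
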